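-- pv_equiv track=rewrite | github.com/Chisanan232/simple-ai-worker | test/e2e_test/common/fake_llm.py | _resolve_tool_name
-- ===== SOURCE A (Python) =====
-- def _resolve_tool_name(preferred: str, available_names: list[str]) -> str | None:
--     """Resolve a preferred tool name to an actual available tool name.
--
--     MCP tools served over HTTP are namespaced by the server address, e.g.
--     ``localhost_8080_mcp_add_comment``.  This method matches *preferred*
--     against *available_names* using:
--
--     1. Exact match.
--     2. Suffix match — available name ends with ``_<preferred>`` (handles
--        any namespace depth, e.g. ``localhost_55572_mcp_add_comment``
--        matches ``add_comment``).
--     3. Substring match — preferred appears anywhere in the available name.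
--
--     Returns the first matching available name, or ``None``.
--     """
--     # 1. Exact match
--     if preferred in available_names:
--         return preferred
--     # 2. Suffix match (namespaced MCP tool names)
--     suffix = f"_{preferred}"
--     for n in available_names:
--         if n.endswith(suffix):
--             return n
--     # 3. Substring match (broader fallback)
--     for n in available_names:
--         if preferred in n:
--             return n
--     return None
-- ===== SOURCE B (Python) =====
-- def _resolve_tool_name(preferred: str, available_names: list[str]) -> str | None:
--     """Single pass: return immediately on exact match; remember the first
--     suffix match and the first substring match, and pick by tier at the end."""
--     suffix = "_" + preferred
--     suffix_match = None
--     substring_match = None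
--     for n in available_names:
--         if n == preferred:
--             return preferred
--         if suffix_match is None and n.endswith(suffix):
--             suffix_match = n
--         if substring_match is None and preferred in n:
--             substring_match = n
--     return suffix_match if suffix_match is not None else substring_match
-- ===== Notes on version B (the rewrite author's own statement) =====
-- stated objective: alternative
-- what changed: Replaces A's three separate scans (membership test, suffix loop, substring loop) with one pass that short-circuits on an exact match and records the first suffix-match and first substring-match candidates, chosen by tier after the loop.
import Mathlib
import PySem

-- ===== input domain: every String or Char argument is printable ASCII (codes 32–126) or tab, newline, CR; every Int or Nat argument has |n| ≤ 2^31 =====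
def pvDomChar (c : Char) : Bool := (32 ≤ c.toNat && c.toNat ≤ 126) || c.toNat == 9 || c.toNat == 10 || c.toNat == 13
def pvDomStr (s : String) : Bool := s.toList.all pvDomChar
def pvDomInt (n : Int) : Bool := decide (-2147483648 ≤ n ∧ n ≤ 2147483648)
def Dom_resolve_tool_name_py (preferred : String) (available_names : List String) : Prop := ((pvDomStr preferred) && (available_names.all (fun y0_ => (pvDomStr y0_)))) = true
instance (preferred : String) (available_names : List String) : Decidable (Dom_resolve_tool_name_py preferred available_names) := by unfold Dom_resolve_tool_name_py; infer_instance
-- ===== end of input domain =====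

-- B makes one pass with per-tier candidate variables instead of A's three separate scans (objective: alternative).

-- ===== PORT A =====
-- A: membership test, then a loop for suffix matches, then a loop for substring matches.
def resolve_tool_name_py (preferred : String) (available_names : List String) : Option String :=
  if available_names.contains preferred then some preferred
  else
    let suffix := "_" ++ preferred
    match available_names.find? (fun n => PySem.Str.endswith n suffix) with
    | some n => some n
    | none => available_names.find? (fun n => PySem.Str.isIn preferred n)

-- ===== PORT B =====
-- B's loop: short-circuit on exact match; record first suffix match and first substring match.
def pvResolveLoop (preferred sfx : String) : List String → Option String → Option String → Option String
  | [], suf, sub => match suf with | some n => some n | none => sub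
  | n :: rest, suf, sub =>
    if n = preferred then some preferred
    else pvResolveLoop preferred sfx rest
      (if suf.isNone && PySem.Str.endswith n sfx then some n else suf)
      (if sub.isNone && PySem.Str.isIn preferred n then some n else sub)

def resolve_tool_name_py_alt (preferred : String) (available_names : List String) : Option String :=
  pvResolveLoop preferred ("_" ++ preferred) available_names none none

-- ===== PRECONDITION & SPEC =====
def Spec_resolve_tool_name_py (preferred : String) (available_names : List String) (out : Option String) : Prop := out = resolve_tool_name_py_alt preferred available_names
instance (preferred : String) (available_names : List String) (out : Option String) : Decidable (Spec_resolve_tool_name_py preferred available_names out) := by unfold Spec_resolve_tool_name_py; infer_instance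

-- ===== CLAIM (what is proved, stated in full; the proofs are below) =====
def Claim_equal_resolve_tool_name_py : Prop := ∀ (preferred : String) (available_names : List String), Dom_resolve_tool_name_py preferred available_names → Spec_resolve_tool_name_py preferred available_names (resolve_tool_name_py preferred available_names)

-- ===== LEMMAS AND PROOFS =====
-- Loop invariant: B's loop equals "exact hit ⇒ preferred; else first-suffix (seeded by suf) ; else first-substring (seeded by sub)".
theorem pvResolveLoop_eq (preferred sfx : String) (xs : List String) (suf sub : Option String) :
    pvResolveLoop preferred sfx xs suf sub =
      if xs.contains preferred then some preferred
      else
        match (match suf with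
               | some n => some n
               | none => xs.find? (fun n => PySem.Str.endswith n sfx)) with
        | some n => some n
        | none =>
          match sub with
          | some n => some n
          | none => xs.find? (fun n => PySem.Str.isIn preferred n) := by
  induction xs generalizing suf sub with
  | nil => cases suf <;> cases sub <;> simp [pvResolveLoop]
  | cons n rest ih =>
    by_cases hn : n = preferred
    · subst hn; simp [pvResolveLoop]
    · simp only [pvResolveLoop, if_neg hn, ih, List.contains_cons, List.find?_cons]
      have hne : (n == preferred) = false := by simp [hn]
      cases suf <;> cases sub <;>
        cases h1 : PySem.Str.endswith n sfx <;>
        cases h2 : PySem.Str.isIn preferred n <;>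
        simp [hne, h1, h2, Ne.symm hn]

-- ===== VERDICT (by name: the statement is the Claim_ definition above) =====
theorem resolve_tool_name_py_spec : Claim_equal_resolve_tool_name_py := by
  intro preferred xs _
  unfold Spec_resolve_tool_name_py resolve_tool_name_py resolve_tool_name_py_alt
  rw [pvResolveLoop_eq]
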